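-- pv_equiv track=rewrite | github.com/LeonY117/AdventsofCode | 2023/day15/part1.py | solution
-- ===== SOURCE A (Python) =====
-- def solution(input):
--     strings = input[0].split(",")
--
--     def HASH(s):
--         curr = 0
--         for char in s:
--             curr += ord(char)
--             curr *= 17
--             curr %= 256
--         return curr
--
--     out = 0
--     for s in strings:
--         out += HASH(s)
--
--     return out
-- ===== SOURCE B (Python) =====
-- def solution(input):
--     # Closed form: the rolling hash is the polynomial sum(ord(c_i) * 17**(n-i)) mod 256,
--     # and 17 has multiplicative order 16 mod 256, so exponents reduce mod 16.
--     total = 0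
--     for seg in input[0].split(","):
--         n = len(seg)
--         total += sum(ord(c) * 17 ** ((n - i) % 16) for i, c in enumerate(seg)) % 256
--     return total
-- ===== Notes on version B (the rewrite author's own statement) =====
-- stated objective: alternative
-- what changed: Replaces A's stateful rolling-hash recurrence (curr=(curr+ord)*17%256 per char) by a direct closed-form polynomial evaluation: each segment's hash is sum(ord(c_i)*17^((n-i) mod 16)) mod 256, using that 17 has multiplicative order 16 modulo 256.
-- outside the precondition, e.g. on solution([]): A raises IndexError, B raises IndexError
import Mathlib
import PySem

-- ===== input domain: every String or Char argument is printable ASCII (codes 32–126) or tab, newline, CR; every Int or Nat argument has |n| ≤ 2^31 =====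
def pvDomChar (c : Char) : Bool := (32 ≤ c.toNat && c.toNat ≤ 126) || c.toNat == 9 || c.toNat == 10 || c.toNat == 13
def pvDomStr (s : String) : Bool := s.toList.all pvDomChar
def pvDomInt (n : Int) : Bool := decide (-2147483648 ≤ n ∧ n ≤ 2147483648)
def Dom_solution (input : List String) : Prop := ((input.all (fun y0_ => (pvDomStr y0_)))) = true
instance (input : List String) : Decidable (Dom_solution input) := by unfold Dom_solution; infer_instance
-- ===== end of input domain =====

-- B replaces A's rolling-hash recurrence by a closed-form per-segment polynomial sum, reducing exponents by the multiplicative order of 17 mod 256 (objective: alternative; same return value).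


-- ===== PORT A =====
-- the nested helper HASH(s): curr = 0; for char: curr += ord(char); curr *= 17; curr %= 256
def pyHASH (s : List Char) : Int :=
  s.foldl (fun curr c => PySem.Int.mod ((curr + (c.toNat : Int)) * 17) 256) 0

def solution (input : List String) : Int :=
  let strings := PySem.Chars.splitOn (PySem.List.pyGetD input 0 "").toList [',']
  strings.foldl (fun out s => out + pyHASH s) 0

-- ===== PORT B =====
def solution_alt (input : List String) : Int :=
  let strings := PySem.Chars.splitOn (PySem.List.pyGetD input 0 "").toList [',']
  strings.foldl (fun total seg =>
    let n := seg.length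
    total + PySem.Int.mod
      ((PySem.List.enumerate seg 0).foldl
        (fun acc ic => acc + (ic.2.toNat : Int) * 17 ^ (PySem.Int.mod ((n : Int) - ic.1) 16).toNat) 0)
      256) 0

-- ===== PRECONDITION & SPEC =====
-- A does input[0]: IndexError on the empty list, so Pre_ excludes only input = [].
def Pre_solution (input : List String) : Prop := input ≠ []
instance (input : List String) : Decidable (Pre_solution input) := by unfold Pre_solution; infer_instance
def pvWitness_solution : List String := ["ab,c"]
def Spec_solution (input : List String) (out : Int) : Prop := out = solution_alt input
instance (input : List String) (out : Int) : Decidable (Spec_solution input out) := by unfold Spec_solution; infer_instance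

-- ===== CLAIM =====
def Claim_equal_solution : Prop := ∀ (input : List String), Dom_solution input → Pre_solution input → Spec_solution input (solution input)

-- ===== LEMMAS AND PROOFS =====

-- 17 has multiplicative order dividing 16 modulo 256, so power exponents reduce mod 16
lemma pow17_mod (k : Nat) : (17 : Int) ^ k ≡ 17 ^ (k % 16) [ZMOD 256] := by
  conv_lhs => rw [← Nat.div_add_mod k 16, pow_add, pow_mul]
  calc ((17:Int)^16)^(k/16) * 17^(k%16)
      ≡ 1^(k/16) * 17^(k%16) [ZMOD 256] := (Int.ModEq.pow _ (by decide)).mul_right _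
    _ = 17^(k%16) := by rw [one_pow, one_mul]

-- A's rolling value stays in [0, 256) once it is there
lemma hash_bounds : ∀ (s : List Char) (a : Int), 0 ≤ a → a < 256 →
    0 ≤ s.foldl (fun curr c => PySem.Int.mod ((curr + (c.toNat : Int)) * 17) 256) a ∧
    s.foldl (fun curr c => PySem.Int.mod ((curr + (c.toNat : Int)) * 17) 256) a < 256 := by
  intro s
  induction s with
  | nil => intro a h1 h2; exact ⟨h1, h2⟩
  | cons c rest ih =>
    intro a _ _
    exact ih _ (PySem.Int.mod_nonneg _ (by norm_num)) (PySem.Int.mod_lt _ (by norm_num))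

-- invariant: A's rolling hash over the suffix r (positions j..n-1 of a length-n segment)
-- agrees mod 256 with a·17^|r| plus B's closed-form sum over that suffix
lemma roll_eq_poly (n : Nat) : ∀ (r : List Char) (j : Nat) (a : Int), j + r.length = n →
    (r.foldl (fun curr c => PySem.Int.mod ((curr + (c.toNat : Int)) * 17) 256) a) % 256 =
    (a * 17 ^ r.length +
      ((PySem.List.enumerate r (j : Int)).foldl
        (fun acc ic => acc + (ic.2.toNat : Int) * 17 ^ (PySem.Int.mod ((n : Int) - ic.1) 16).toNat) 0)) % 256 := by
  intro r
  induction r with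
  | nil =>
    intro j a _
    simp [PySem.List.enumerate_nil]
  | cons c rest ih =>
    intro j a hj
    have hm : (j + 1) + rest.length = n := by simp at hj; omega
    rw [List.foldl_cons, ih (j + 1) _ hm]
    rw [PySem.List.enumerate_cons, List.foldl_cons]
    rw [PySem.List.foldl_add, PySem.List.foldl_add]
    have hexp : (PySem.Int.mod ((n : Int) - (j : Int)) 16).toNat = (rest.length + 1) % 16 := by
      have hnj : (n : Int) - (j : Int) = ((rest.length + 1 : Nat) : Int) := by push_cast; omega
      rw [hnj, PySem.Int.mod_eq_emod_of_pos (by norm_num : (0:Int) < 16)]; omega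
    rw [hexp]
    rw [PySem.Int.mod_eq_emod_of_pos (by norm_num : (0:Int) < 256)]
    set T := ((PySem.List.enumerate rest ((j : Int) + 1)).map
      (fun ic => (ic.2.toNat : Int) * 17 ^ (PySem.Int.mod ((n : Int) - ic.1) 16).toNat)).sum with hT
    show ((a + (c.toNat:Int)) * 17 % 256 * 17 ^ rest.length + (0 + T)) % 256 =
      (a * 17 ^ (rest.length + 1) + ((0 + (c.toNat:Int) * 17 ^ ((rest.length + 1) % 16)) + T)) % 256
    have h1 : (a + (c.toNat:Int)) * 17 % 256 ≡ (a + (c.toNat:Int)) * 17 [ZMOD 256] :=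
      Int.emod_emod_of_dvd _ dvd_rfl
    have h2 : (c.toNat:Int) * 17 ^ ((rest.length + 1) % 16) ≡ (c.toNat:Int) * 17 ^ (rest.length + 1) [ZMOD 256] :=
      Int.ModEq.mul_left _ (pow17_mod (rest.length + 1)).symm
    calc (a + (c.toNat:Int)) * 17 % 256 * 17 ^ rest.length + (0 + T)
        ≡ (a + (c.toNat:Int)) * 17 * 17 ^ rest.length + (0 + T) [ZMOD 256] :=
          (h1.mul_right _).add_right _
      _ = a * 17 ^ (rest.length + 1) + ((0 + (c.toNat:Int) * 17 ^ (rest.length + 1)) + T) := by ring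
      _ ≡ a * 17 ^ (rest.length + 1) + ((0 + (c.toNat:Int) * 17 ^ ((rest.length + 1) % 16)) + T) [ZMOD 256] :=
          Int.ModEq.add_left _ (Int.ModEq.add_right _ (Int.ModEq.add_left _ h2.symm))

-- per-segment: A's HASH equals B's closed-form value
lemma hash_eq_closed (seg : List Char) :
    pyHASH seg = PySem.Int.mod
      ((PySem.List.enumerate seg 0).foldl
        (fun acc ic => acc + (ic.2.toNat : Int) * 17 ^ (PySem.Int.mod ((seg.length : Int) - ic.1) 16).toNat) 0)
      256 := by
  have hb := hash_bounds seg 0 le_rfl (by norm_num)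
  have hself : pyHASH seg % 256 = pyHASH seg := Int.emod_eq_of_lt hb.1 hb.2
  have h := roll_eq_poly seg.length seg 0 0 (by simp)
  rw [PySem.Int.mod_eq_emod_of_pos (by norm_num : (0:Int) < 256)]
  rw [← hself]
  unfold pyHASH
  simp only [Nat.cast_zero] at h
  rw [h, zero_mul, zero_add]

-- the outer loops agree segment by segment
lemma outer_fold (L : List (List Char)) (t : Int) :
    L.foldl (fun out s => out + pyHASH s) t =
    L.foldl (fun total seg => total + PySem.Int.mod
      ((PySem.List.enumerate seg 0).foldl
        (fun acc ic => acc + (ic.2.toNat : Int) * 17 ^ (PySem.Int.mod ((seg.length : Int) - ic.1) 16).toNat) 0)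
      256) t := by
  induction L generalizing t with
  | nil => rfl
  | cons seg rest ih => rw [List.foldl_cons, List.foldl_cons, hash_eq_closed, ih]

-- ===== VERDICT =====
theorem solution_spec : Claim_equal_solution := by
  intro input _hdom _hpre
  unfold Spec_solution solution solution_alt
  exact outer_fold _ 0
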